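-- pv_equiv track=rewrite | github.com/Cenrip-cArifan/crossword-puzzle | proj2.py | firstLetterCheck
-- ===== SOURCE A (Python) =====
-- def firstLetterCheck(word, board, i, j, i_direction, j_direction):
--
-- 	if (len(word) == 0):
--
-- 		return True
--
-- 	if (i < 0 or i > len(board) - 1):
--
-- 		return False
--
-- 	if (j < 0 or j > len(board[i]) - 1):
--
-- 		return False
--
-- 	if (word[0] == board[i][j]):
--
-- 		restOfWord = word[1:]
--
-- 		return firstLetterCheck(restOfWord, board, i + i_direction, j + j_direction, i_direction, j_direction)
--
-- 	return False
-- ===== SOURCE B (Python) =====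
-- def firstLetterCheck(word, board, i, j, i_direction, j_direction):
--     for k in range(len(word)):
--         ci = i + k * i_direction
--         cj = j + k * j_direction
--         if not (0 <= ci < len(board)):
--             return False
--         row = board[ci]
--         if not (0 <= cj < len(row)):
--             return False
--         if word[k] != row[cj]:
--             return False
--     return True
-- ===== Notes on version B (the rewrite author's own statement) =====
-- stated objective: simpler
-- what changed: Replaced the tail recursion that re-slices word[1:] and accumulates the position with a single flat loop over k computing each cell as i + k*i_direction, j + k*j_direction directly.
import Mathlib
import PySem

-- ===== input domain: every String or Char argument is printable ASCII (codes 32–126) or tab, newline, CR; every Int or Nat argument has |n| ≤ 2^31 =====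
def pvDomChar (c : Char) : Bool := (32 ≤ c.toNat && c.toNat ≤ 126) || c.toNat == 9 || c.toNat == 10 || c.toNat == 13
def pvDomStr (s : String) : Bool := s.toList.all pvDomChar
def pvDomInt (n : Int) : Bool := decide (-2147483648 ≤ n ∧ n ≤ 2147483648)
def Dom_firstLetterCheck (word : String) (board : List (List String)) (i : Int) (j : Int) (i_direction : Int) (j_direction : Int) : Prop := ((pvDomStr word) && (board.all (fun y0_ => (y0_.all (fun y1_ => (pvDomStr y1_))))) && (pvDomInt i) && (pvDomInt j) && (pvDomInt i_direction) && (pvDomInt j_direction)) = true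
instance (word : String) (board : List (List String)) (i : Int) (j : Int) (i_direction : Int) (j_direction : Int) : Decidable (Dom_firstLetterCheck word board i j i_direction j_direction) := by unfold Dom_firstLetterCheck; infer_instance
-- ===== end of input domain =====

-- B replaces A's tail recursion (which re-slices word[1:] and steps the position) with one
-- flat loop over k reading the cell at (i + k*i_direction, j + k*j_direction); objective: simpler.
-- ===== PORT A =====
-- recursion on the characters of word, exactly A's guards in A's order
def fcA : List Char → List (List String) → Int → Int → Int → Int → Bool
  | [], _, _, _, _, _ => true
  | c :: rest, board, i, j, di, dj =>
    if i < 0 ∨ i > (board.length : Int) - 1 then false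
    else
      let row := (PySem.List.pyGet? board i).getD []
      if j < 0 ∨ j > (row.length : Int) - 1 then false
      else if String.mk [c] == (PySem.List.pyGet? row j).getD "" then
        fcA rest board (i + di) (j + dj) di dj
      else false

def firstLetterCheck (word : String) (board : List (List String)) (i : Int) (j : Int) (i_direction : Int) (j_direction : Int) : Bool :=
  fcA word.toList board i j i_direction j_direction

-- ===== PORT B =====
-- one iteration of B's loop body: bounds checks then the character comparison at (ci, cj)
def fcCell (board : List (List String)) (ci cj : Int) (c : Char) : Bool :=
  if 0 ≤ ci ∧ ci < (board.length : Int) then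
    let row := (PySem.List.pyGet? board ci).getD []
    if 0 ≤ cj ∧ cj < (row.length : Int) then
      String.mk [c] == (PySem.List.pyGet? row cj).getD ""
    else false
  else false

-- the for-loop: k is the loop counter, word[k] the character consumed at step k
def fcB (board : List (List String)) (i j di dj : Int) : List Char → Nat → Bool
  | [], _ => true
  | c :: rest, k => fcCell board (i + (k : Int) * di) (j + (k : Int) * dj) c && fcB board i j di dj rest (k + 1)

def firstLetterCheck_alt (word : String) (board : List (List String)) (i : Int) (j : Int) (i_direction : Int) (j_direction : Int) : Bool :=
  fcB board i j i_direction j_direction word.toList 0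

-- ===== PRECONDITION & SPEC =====
def Spec_firstLetterCheck (word : String) (board : List (List String)) (i : Int) (j : Int) (i_direction : Int) (j_direction : Int) (out : Bool) : Prop := out = firstLetterCheck_alt word board i j i_direction j_direction
instance (word : String) (board : List (List String)) (i : Int) (j : Int) (i_direction : Int) (j_direction : Int) (out : Bool) : Decidable (Spec_firstLetterCheck word board i j i_direction j_direction out) := by unfold Spec_firstLetterCheck; infer_instance

-- ===== CLAIM (what is proved, stated in full; the proofs are below) =====
def Claim_equal_firstLetterCheck : Prop := ∀ (word : String) (board : List (List String)) (i : Int) (j : Int) (i_direction : Int) (j_direction : Int), Dom_firstLetterCheck word board i j i_direction j_direction → Spec_firstLetterCheck word board i j i_direction j_direction (firstLetterCheck word board i j i_direction j_direction)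

-- ===== LEMMAS AND PROOFS =====

-- ===== VERDICT (by name: the statement is the Claim_ definition above) =====
lemma fcA_eq_fcB (w : List Char) (board : List (List String)) (i j di dj : Int) (k : Nat) :
    fcA w board (i + (k : Int) * di) (j + (k : Int) * dj) di dj = fcB board i j di dj w k := by
  induction w generalizing k with
  | nil => rfl
  | cons c rest ih =>
    have h1 : i + (k : Int) * di + di = i + ((k + 1 : Nat) : Int) * di := by push_cast; ring
    have h2 : j + (k : Int) * dj + dj = j + ((k + 1 : Nat) : Int) * dj := by push_cast; ring
    simp only [fcA, fcB, fcCell]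
    by_cases hb : 0 ≤ i + (k : Int) * di ∧ i + (k : Int) * di < (board.length : Int)
    · rw [if_neg (by omega), if_pos hb]
      set row := (PySem.List.pyGet? board (i + (k : Int) * di)).getD []
      by_cases hr : 0 ≤ j + (k : Int) * dj ∧ j + (k : Int) * dj < (row.length : Int)
      · rw [if_neg (by omega), if_pos hr]
        by_cases hc : String.mk [c] == (PySem.List.pyGet? row (j + (k : Int) * dj)).getD ""
        · rw [if_pos hc, hc, Bool.true_and, h1, h2, ih]
        · rw [if_neg hc, Bool.not_eq_true] at *
          rw [hc, Bool.false_and]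
      · rw [if_pos (by omega), if_neg hr, Bool.false_and]
    · rw [if_pos (by omega), if_neg hb, Bool.false_and]

theorem firstLetterCheck_spec : Claim_equal_firstLetterCheck := by
  intro word board i j di dj _
  unfold Spec_firstLetterCheck firstLetterCheck firstLetterCheck_alt
  have h := fcA_eq_fcB word.toList board i j di dj 0
  simpa using h
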